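-- pv_equiv track=rewrite | github.com/thorthur22/Tali | src/tali/task_runner.py | _is_actionable_followup
-- ===== SOURCE A (Python) =====
-- def _is_actionable_followup(user_input: str) -> bool:
--     normalized = user_input.strip().lower()
--     if not normalized:
--         return False
--     actionable_markers = (
--         "do ",
--         "make ",
--         "work on ",
--         "build ",
--         "create ",
--         "implement ",
--         "fix ",
--         "update ",
--         "add ",
--         "remove ",
--         "refactor ",
--         "change ",
--         "continue ",
--         "resume ",
--         "please ",
--         "can you ",
--         "could you ",
--     )
--     return (
--         normalized.startswith(actionable_markers)
--         or any(f" {marker}" in normalized for marker in actionable_markers)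
--     )
-- ===== SOURCE B (Python) =====
-- def _is_actionable_followup(user_input: str) -> bool:
--     normalized = user_input.strip().lower()
--     if not normalized:
--         return False
--     actionable_markers = (
--         "do ",
--         "make ",
--         "work on ",
--         "build ",
--         "create ",
--         "implement ",
--         "fix ",
--         "update ",
--         "add ",
--         "remove ",
--         "refactor ",
--         "change ",
--         "continue ",
--         "resume ",
--         "please ",
--         "can you ",
--         "could you ",
--     )
--     padded = " " + normalized
--     for i in range(len(padded)):
--         if padded[i] == " ":
--             tail = padded[i + 1:]
--             if any(tail.startswith(marker) for marker in actionable_markers):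
--                 return True
--     return False
-- ===== Notes on version B (the rewrite author's own statement) =====
-- stated objective: alternative
-- what changed: Replaces the startswith-on-tuple branch plus per-marker substring membership scan with one explicit left-to-right scan over the space-padded normalized text that, at each space position, checks whether a marker is a prefix of the remainder, merging the start-of-string and after-a-space cases into a single word-boundary pass.
import Mathlib
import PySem

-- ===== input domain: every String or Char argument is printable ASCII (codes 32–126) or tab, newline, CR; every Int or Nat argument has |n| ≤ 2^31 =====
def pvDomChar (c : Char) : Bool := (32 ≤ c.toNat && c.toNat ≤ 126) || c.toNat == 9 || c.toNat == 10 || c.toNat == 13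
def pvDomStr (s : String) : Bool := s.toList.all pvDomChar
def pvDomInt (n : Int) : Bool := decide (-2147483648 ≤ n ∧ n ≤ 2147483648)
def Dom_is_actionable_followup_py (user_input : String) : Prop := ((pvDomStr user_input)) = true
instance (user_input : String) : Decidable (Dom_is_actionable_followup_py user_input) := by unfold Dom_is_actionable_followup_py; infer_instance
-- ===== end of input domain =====

-- B replaces A's startswith-tuple-or-substring test with one explicit scan of ' ' + normalized
-- checking each space position for a following marker (alternative decomposition, same cost).


-- the same marker tuple both Pythons carry
def pvMarkers : List (List Char) :=
  ["do ", "make ", "work on ", "build ", "create ", "implement ", "fix ", "update ",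
   "add ", "remove ", "refactor ", "change ", "continue ", "resume ", "please ",
   "can you ", "could you "].map String.toList

-- ===== PORT A =====
def is_actionable_followup_py (user_input : String) : Bool :=
  let normalized := PySem.Chars.lower (PySem.Chars.strip user_input.toList)
  if normalized = [] then false
  else
    pvMarkers.any (fun m => PySem.Chars.startswith normalized m) ||
    pvMarkers.any (fun m => PySem.Chars.isIn (' ' :: m) normalized)

-- ===== PORT B =====
-- the 'for i in range(len(padded))' loop of Source B, walking the suffixes of padded
def pvScan : List Char → Bool
  | [] => false
  | c :: tail =>
    (c == ' ' && pvMarkers.any (fun m => PySem.Chars.startswith tail m)) || pvScan tail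

def is_actionable_followup_py_alt (user_input : String) : Bool :=
  let normalized := PySem.Chars.lower (PySem.Chars.strip user_input.toList)
  if normalized = [] then false
  else pvScan (' ' :: normalized)

-- ===== PRECONDITION & SPEC =====
def Spec_is_actionable_followup_py (user_input : String) (out : Bool) : Prop := out = is_actionable_followup_py_alt user_input
instance (user_input : String) (out : Bool) : Decidable (Spec_is_actionable_followup_py user_input out) := by unfold Spec_is_actionable_followup_py; infer_instance

-- ===== CLAIM (what is proved, stated in full; the proofs are below) =====
def Claim_equal_is_actionable_followup_py : Prop := ∀ (user_input : String), Dom_is_actionable_followup_py user_input → Spec_is_actionable_followup_py user_input (is_actionable_followup_py user_input)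

-- ===== LEMMAS AND PROOFS =====

-- B's scan finds exactly the markers that occur with a space glued in front
theorem pvScan_iff (cs : List Char) :
    pvScan cs = true ↔ ∃ m ∈ pvMarkers, (' ' :: m) <:+: cs := by
  induction cs with
  | nil =>
    simp [pvScan]
  | cons c tail ih =>
    simp only [pvScan, Bool.or_eq_true, Bool.and_eq_true, List.any_eq_true, ih,
      PySem.Chars.startswith_iff, beq_iff_eq]
    constructor
    · rintro (⟨hc, m, hm, hp⟩ | ⟨m, hm, hi⟩)
      · exact ⟨m, hm, (List.infix_cons_iff).2 (Or.inl (by subst hc; exact List.cons_prefix_cons.2 ⟨rfl, hp⟩))⟩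
      · exact ⟨m, hm, (List.infix_cons_iff).2 (Or.inr hi)⟩
    · rintro ⟨m, hm, hi⟩
      rcases (List.infix_cons_iff).1 hi with hp | hi
      · rcases List.cons_prefix_cons.1 hp with ⟨hc, hp⟩
        exact Or.inl ⟨hc.symm, m, hm, hp⟩
      · exact Or.inr ⟨m, hm, hi⟩

-- ===== VERDICT (by name: the statement is the Claim_ definition above) =====
theorem is_actionable_followup_py_spec : Claim_equal_is_actionable_followup_py := by
  intro user_input _
  unfold Spec_is_actionable_followup_py is_actionable_followup_py is_actionable_followup_py_alt
  set n := PySem.Chars.lower (PySem.Chars.strip user_input.toList) with hn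
  by_cases h : n = []
  · simp [h]
  · simp only [h, if_false]
    apply Bool.coe_iff_coe.1
    rw [pvScan_iff]
    simp only [Bool.or_eq_true, List.any_eq_true, PySem.Chars.startswith_iff,
      PySem.Chars.isIn_iff_infix]
    constructor
    · rintro (⟨m, hm, hp⟩ | ⟨m, hm, hi⟩)
      · exact ⟨m, hm, (List.infix_cons_iff).2 (Or.inl (List.cons_prefix_cons.2 ⟨rfl, hp⟩))⟩
      · exact ⟨m, hm, (List.infix_cons_iff).2 (Or.inr hi)⟩
    · rintro ⟨m, hm, hi⟩
      rcases (List.infix_cons_iff).1 hi with hp | hi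
      · exact Or.inl ⟨m, hm, (List.cons_prefix_cons.1 hp).2⟩
      · exact Or.inr ⟨m, hm, hi⟩
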